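-- pv_equiv track=rewrite | github.com/skm08/Data-Structures-Algorithms | 2690-house-robber-iv/house-robber-iv.py | canAssign
-- ===== SOURCE A (Python) =====
-- from typing import List
--
-- def canAssign(max_val: int, nums: List[int], k: int) -> bool:
--     count = 0
--     i = 0
--     while i < len(nums):
--         if nums[i] <= max_val:
--             count += 1
--             i += 1  # Skip the next house
--         i += 1
--     return count >= k
-- ===== SOURCE B (Python) =====
-- from typing import List
--
-- def canAssign(max_val: int, nums: List[int], k: int) -> bool:
--     # Run-length view: within each maximal run of r consecutive houses with
--     # value <= max_val, exactly ceil(r/2) = (r+1)//2 non-adjacent houses fit,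
--     # and runs are independent. Sum that closed form over the runs.
--     total = 0
--     run = 0
--     for x in nums:
--         if x <= max_val:
--             run += 1
--         else:
--             total += (run + 1) // 2
--             run = 0
--     total += (run + 1) // 2
--     return total >= k
-- ===== Notes on version B (the rewrite author's own statement) =====
-- stated objective: alternative
-- what changed: Replaced A's greedy index-jumping walk (take a house, skip the next by i += 2) with a run-length decomposition: measure each maximal run of consecutive qualifying houses and add the closed form (run+1)//2 per run, which equals the greedy count because runs are independent.
import Mathlib
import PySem

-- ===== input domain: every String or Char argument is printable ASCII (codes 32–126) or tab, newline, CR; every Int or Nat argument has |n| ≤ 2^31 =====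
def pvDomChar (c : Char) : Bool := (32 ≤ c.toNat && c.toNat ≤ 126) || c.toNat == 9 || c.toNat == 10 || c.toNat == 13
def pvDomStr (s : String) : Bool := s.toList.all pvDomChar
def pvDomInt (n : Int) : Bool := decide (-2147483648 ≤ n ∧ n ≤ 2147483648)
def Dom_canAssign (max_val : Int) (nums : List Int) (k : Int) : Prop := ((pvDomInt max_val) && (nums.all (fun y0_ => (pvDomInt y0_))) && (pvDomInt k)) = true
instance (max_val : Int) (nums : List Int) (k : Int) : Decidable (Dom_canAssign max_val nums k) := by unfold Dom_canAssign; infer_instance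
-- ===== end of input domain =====

-- B replaces A's greedy skip-the-next-house index walk by a run-length decomposition
-- (each maximal qualifying run of length r contributes (r+1)//2); return values agree.

-- ===== PORT A =====
-- A's while loop over index i: taking nums[i] advances i by 2 (skipping the next house),
-- otherwise by 1; rendered as the obvious recursion on the remaining suffix.
def canAssignLoopA (max_val : Int) : List Int → Int → Int
  | [], count => count
  | x :: rest, count =>
      if x ≤ max_val then canAssignLoopA max_val (rest.drop 1) (count + 1)  -- i += 2
      else canAssignLoopA max_val rest count                                 -- i += 1
  termination_by l => l.length
  decreasing_by
  all_goals (simp; try omega)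

def canAssign (max_val : Int) (nums : List Int) (k : Int) : Bool :=
  canAssignLoopA max_val nums 0 ≥ k

-- ===== PORT B =====
-- B's for-loop body: state (total, run); a non-qualifying element closes the current
-- run, adding its closed-form contribution (run + 1) // 2.
def canAssignStepB (max_val : Int) (st : Int × Int) (x : Int) : Int × Int :=
  if x ≤ max_val then (st.1, st.2 + 1)
  else (st.1 + PySem.Int.floordiv (st.2 + 1) 2, 0)

def canAssign_alt (max_val : Int) (nums : List Int) (k : Int) : Bool :=
  let st := nums.foldl (canAssignStepB max_val) (0, 0)
  st.1 + PySem.Int.floordiv (st.2 + 1) 2 ≥ k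

-- ===== PRECONDITION & SPEC =====
def Spec_canAssign (max_val : Int) (nums : List Int) (k : Int) (out : Bool) : Prop := out = canAssign_alt max_val nums k
instance (max_val : Int) (nums : List Int) (k : Int) (out : Bool) : Decidable (Spec_canAssign max_val nums k out) := by unfold Spec_canAssign; infer_instance

-- ===== CLAIM (what is proved, stated in full; the proofs are below) =====
def Claim_equal_canAssign : Prop := ∀ (max_val : Int) (nums : List Int) (k : Int), Dom_canAssign max_val nums k → Spec_canAssign max_val nums k (canAssign max_val nums k)

-- ===== LEMMAS AND PROOFS =====

-- Proof-side bridge: A's greedy rephrased as a flag-threading fold (count, prev_taken).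
def pvStepFlag (max_val : Int) (st : Int × Bool) (x : Int) : Int × Bool :=
  if x ≤ max_val ∧ st.2 = false then (st.1 + 1, true) else (st.1, false)

-- From a prev_taken=true state, the first element is never taken and the flag resets.
theorem pvFlag_true_reset (max_val : Int) (l : List Int) (c : Int) :
    (l.foldl (pvStepFlag max_val) (c, true)).1 =
      ((l.drop 1).foldl (pvStepFlag max_val) (c, false)).1 := by
  cases l with
  | nil => simp
  | cons y rest => simp [pvStepFlag]

theorem loopA_eq_foldFlag (max_val : Int) (l : List Int) (c : Int) :
    canAssignLoopA max_val l c = (l.foldl (pvStepFlag max_val) (c, false)).1 := by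
  induction l, c using canAssignLoopA.induct max_val with
  | case1 c => simp [canAssignLoopA]
  | case2 x rest c htake ih =>
      have hstep : pvStepFlag max_val (c, false) x = (c + 1, true) := by
        simp [pvStepFlag, htake]
      rw [canAssignLoopA, if_pos htake, List.foldl_cons, hstep, ih, ← pvFlag_true_reset]
  | case3 x rest c htake ih =>
      have hstep : pvStepFlag max_val (c, false) x = (c, false) := by
        simp [pvStepFlag, htake]
      rw [canAssignLoopA, if_neg htake, List.foldl_cons, hstep, ih]

-- Invariant linking the flag fold to B's run fold: with run length r ≥ 0,
-- count = total + (r+1)//2 and prev_taken ↔ r is odd.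
theorem foldFlag_eq_foldRun (max_val : Int) (l : List Int) (t r : Int) (hr : 0 ≤ r) :
    (l.foldl (pvStepFlag max_val) (t + PySem.Int.floordiv (r + 1) 2, decide (r % 2 = 1))).1
      = ((l.foldl (canAssignStepB max_val) (t, r)).1
          + PySem.Int.floordiv ((l.foldl (canAssignStepB max_val) (t, r)).2 + 1) 2) := by
  induction l generalizing t r with
  | nil => simp
  | cons x rest ih =>
      rw [List.foldl_cons, List.foldl_cons]
      by_cases hx : x ≤ max_val
      · have h1 : canAssignStepB max_val (t, r) x = (t, r + 1) := by
          simp [canAssignStepB, hx]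
        by_cases hodd : r % 2 = 1
        · have h2 : pvStepFlag max_val (t + PySem.Int.floordiv (r + 1) 2, decide (r % 2 = 1)) x
              = (t + PySem.Int.floordiv (r + 1 + 1) 2, decide ((r + 1) % 2 = 1)) := by
            simp [pvStepFlag, hodd]
            omega
          rw [h2, h1]
          exact ih (t) (r + 1) (by omega)
        · have h2 : pvStepFlag max_val (t + PySem.Int.floordiv (r + 1) 2, decide (r % 2 = 1)) x
              = (t + PySem.Int.floordiv (r + 1 + 1) 2, decide ((r + 1) % 2 = 1)) := by
            simp [pvStepFlag, hx, hodd]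
            omega
          rw [h2, h1]
          exact ih (t) (r + 1) (by omega)
      · have h1 : canAssignStepB max_val (t, r) x
            = (t + PySem.Int.floordiv (r + 1) 2, 0) := by
          simp [canAssignStepB, hx]
        have h2 : pvStepFlag max_val (t + PySem.Int.floordiv (r + 1) 2, decide (r % 2 = 1)) x
            = (t + PySem.Int.floordiv (r + 1) 2 + PySem.Int.floordiv (0 + 1) 2, decide ((0:Int) % 2 = 1)) := by
          simp [pvStepFlag, hx]
        rw [h2, h1]
        exact ih _ 0 (by omega)

-- ===== VERDICT (by name: the statement is the Claim_ definition above) =====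
theorem canAssign_spec : Claim_equal_canAssign := by
  intro max_val nums k _
  unfold Spec_canAssign canAssign canAssign_alt
  have h := foldFlag_eq_foldRun max_val nums 0 0 (by omega)
  rw [loopA_eq_foldFlag]
  norm_num [PySem.Int.floordiv_eq_ediv_of_pos] at h ⊢
  rw [h]
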